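-- pv_equiv track=rewrite | github.com/ffreemt/tinybee-aligner | tinybee/zip_longest_middle.py | zip_longest_middle
-- ===== SOURCE A (Python) =====
-- def zip_longest_middle(list1, list2, fillvalue=None):
--     """Zip longest but spread in the middle."""
--     len1 = len(list1)
--     len2 = len(list2)
--
--     if len1 == len2:
--         out1 = zip(list1, list2)
--     elif len2 > len1:
--         tmp = [fillvalue] * (len2 - len1)
--         _ = (len1 + 1) // 2
--         out1 = list1[: (len1 + 1) // 2] + tmp + list1[_:]
--         out1 = zip(out1, list2)
--     else:
--         tmp = [fillvalue] * (len1 - len2)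
--         _ = (len2 + 1) // 2
--         out1 = list2[: (len2 + 1) // 2] + tmp + list2[_:]
--         out1 = zip(list1, out1)
--
--     out = []
--     for elm in out1:
--         # out += list(elm)
--         # out += elm  # list of numbers
--         out.append(elm)  # list of tuples
--
--     return out
-- ===== SOURCE B (Python) =====
-- def zip_longest_middle(list1, list2, fillvalue=None):
--     """Zip longest but spread in the middle (single index pass, no padded copy)."""
--     len1, len2 = len(list1), len(list2)
--     n = max(len1, len2)
--     pad = max(len1, len2) - min(len1, len2)
--     if len1 <= len2:
--         half = (len1 + 1) // 2
--         return [((list1[j] if j < half else fillvalue if j < half + pad else list1[j - pad]), list2[j])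
--                 for j in range(n)]
--     half = (len2 + 1) // 2
--     return [(list1[j], (list2[j] if j < half else fillvalue if j < half + pad else list2[j - pad]))
--             for j in range(n)]
-- ===== Notes on version B (the rewrite author's own statement) =====
-- stated objective: alternative
-- what changed: B replaces A's build-a-padded-copy (two slices + replicate + zip + append loop) by a single index loop over range(max(len1,len2)) that computes each pair directly from the split/pad arithmetic, allocating no intermediate list.
import Mathlib
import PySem

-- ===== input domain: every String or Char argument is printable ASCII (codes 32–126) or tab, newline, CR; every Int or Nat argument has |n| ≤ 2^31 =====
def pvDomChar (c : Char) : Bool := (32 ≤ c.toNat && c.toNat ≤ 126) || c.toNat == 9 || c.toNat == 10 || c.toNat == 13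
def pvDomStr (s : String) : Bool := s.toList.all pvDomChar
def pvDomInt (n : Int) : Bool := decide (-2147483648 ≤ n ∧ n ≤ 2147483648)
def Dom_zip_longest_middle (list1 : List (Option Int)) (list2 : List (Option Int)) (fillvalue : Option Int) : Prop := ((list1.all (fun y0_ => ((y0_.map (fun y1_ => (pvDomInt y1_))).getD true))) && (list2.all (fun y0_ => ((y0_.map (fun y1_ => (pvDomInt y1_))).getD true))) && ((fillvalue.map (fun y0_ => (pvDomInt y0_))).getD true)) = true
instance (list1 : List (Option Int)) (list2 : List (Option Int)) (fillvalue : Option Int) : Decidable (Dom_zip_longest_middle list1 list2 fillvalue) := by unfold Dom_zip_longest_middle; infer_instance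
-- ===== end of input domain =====

-- ===== PORT A =====
-- B builds each output pair directly by index instead of materialising A's padded copy; same cost, no intermediate list.
def zip_longest_middle (list1 : List (Option Int)) (list2 : List (Option Int)) (fillvalue : Option Int) : List (Option Int × Option Int) :=
  let len1 := list1.length
  let len2 := list2.length
  let out1 :=
    if len1 = len2 then
      list1.zip list2
    else if len2 > len1 then
      let tmp := List.replicate (len2 - len1) fillvalue
      let o := PySem.List.slice list1 none (some (((len1 + 1) / 2 : Nat) : Int)) ++ tmp
               ++ PySem.List.slice list1 (some (((len1 + 1) / 2 : Nat) : Int)) none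
      o.zip list2
    else
      let tmp := List.replicate (len1 - len2) fillvalue
      let o := PySem.List.slice list2 none (some (((len2 + 1) / 2 : Nat) : Int)) ++ tmp
               ++ PySem.List.slice list2 (some (((len2 + 1) / 2 : Nat) : Int)) none
      list1.zip o
  out1.foldl (fun out elm => out ++ [elm]) []

-- ===== PORT B =====
-- indices j and j - pad are always in range where used, so List.getD is exact for Python's list1[j]
def zip_longest_middle_alt (list1 : List (Option Int)) (list2 : List (Option Int)) (fillvalue : Option Int) : List (Option Int × Option Int) :=
  let len1 := list1.length
  let len2 := list2.length
  let n := max len1 len2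
  let pad := max len1 len2 - min len1 len2
  if len1 ≤ len2 then
    let half := (len1 + 1) / 2
    (List.range n).map (fun j =>
      ((if j < half then list1.getD j none
        else if j < half + pad then fillvalue
        else list1.getD (j - pad) none), list2.getD j none))
  else
    let half := (len2 + 1) / 2
    (List.range n).map (fun j =>
      (list1.getD j none,
       (if j < half then list2.getD j none
        else if j < half + pad then fillvalue
        else list2.getD (j - pad) none)))

-- ===== PRECONDITION & SPEC =====
def Spec_zip_longest_middle (list1 : List (Option Int)) (list2 : List (Option Int)) (fillvalue : Option Int) (out : List (Option Int × Option Int)) : Prop := out = zip_longest_middle_alt list1 list2 fillvalue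
instance (list1 : List (Option Int)) (list2 : List (Option Int)) (fillvalue : Option Int) (out : List (Option Int × Option Int)) : Decidable (Spec_zip_longest_middle list1 list2 fillvalue out) := by unfold Spec_zip_longest_middle; infer_instance

-- ===== CLAIM (what is proved, stated in full; the proofs are below) =====
def Claim_equal_zip_longest_middle : Prop := ∀ (list1 : List (Option Int)) (list2 : List (Option Int)) (fillvalue : Option Int), Dom_zip_longest_middle list1 list2 fillvalue → Spec_zip_longest_middle list1 list2 fillvalue (zip_longest_middle list1 list2 fillvalue)

-- ===== LEMMAS AND PROOFS =====

-- ===== VERDICT (by name: the statement is the Claim_ definition above) =====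
-- the padded copy A zips has, at index j, exactly B's per-index formula
lemma getD_eq_getElem' (l : List (Option Int)) (j : Nat) (h : j < l.length) :
    l.getD j none = l[j] := by
  simp [List.getD_eq_getElem?_getD, List.getElem?_eq_getElem h]

lemma padded_getElem (l : List (Option Int)) (fv : Option Int) (pad j : Nat)
    (hj : j < l.length + pad) :
    (l.take ((l.length + 1) / 2) ++ List.replicate pad fv ++ l.drop ((l.length + 1) / 2))[j]'(by
      simp [List.length_take, List.length_replicate, List.length_drop]; omega) =
    (if j < (l.length + 1) / 2 then l.getD j none
     else if j < (l.length + 1) / 2 + pad then fv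
     else l.getD (j - pad) none) := by
  have hhalf : (l.length + 1) / 2 ≤ l.length := by omega
  have htl : (l.take ((l.length + 1) / 2)).length = (l.length + 1) / 2 := by
    simp [List.length_take]; omega
  rcases Nat.lt_or_ge j ((l.length + 1) / 2) with h1 | h1
  · rw [List.getElem_append_left (by simp [htl, List.length_replicate]; omega),
        List.getElem_append_left (by omega),
        List.getElem_take]
    rw [if_pos h1, getD_eq_getElem' l j (by omega)]
  · rcases Nat.lt_or_ge j ((l.length + 1) / 2 + pad) with h2 | h2
    · rw [List.getElem_append_left (by simp [htl, List.length_replicate]; omega),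
          List.getElem_append_right (by omega)]
      rw [List.getElem_replicate, if_neg (by omega), if_pos (by omega)]
    · rw [List.getElem_append_right (by simp [htl, List.length_replicate]; omega),
          List.getElem_drop]
      rw [if_neg (by omega), if_neg (by omega), getD_eq_getElem' l (j - pad) (by omega)]
      congr 1
      simp [htl, List.length_replicate]
      omega

lemma zip_eq_map_range (l1 l2 : List (Option Int)) (h : l1.length = l2.length) :
    l1.zip l2 = (List.range l1.length).map (fun j => (l1.getD j none, l2.getD j none)) := by
  apply List.ext_getElem
  · simp [h]
  · intro j h1 h2
    have hj1 : j < l1.length := by simp [List.length_zip] at h1; omega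
    have hj2 : j < l2.length := by omega
    simp [List.getElem_zip, List.getElem?_eq_getElem hj1, List.getElem?_eq_getElem hj2]

theorem zip_longest_middle_spec : Claim_equal_zip_longest_middle := by
  intro l1 l2 fv _
  unfold Spec_zip_longest_middle zip_longest_middle zip_longest_middle_alt
  simp only [PySem.List.foldl_append_singleton_eq_self, List.nil_append,
             PySem.List.slice_to_natCast, PySem.List.slice_from_natCast]
  rcases Nat.lt_trichotomy l1.length l2.length with hlt | heq | hgt
  · -- len1 < len2 : A pads list1
    rw [if_neg (by omega), if_pos (by omega), if_pos (by omega)]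
    have hmax : max l1.length l2.length = l2.length := by omega
    have hmin : min l1.length l2.length = l1.length := by omega
    simp only [hmax, hmin]
    apply List.ext_getElem
    · simp [List.length_take, List.length_replicate, List.length_drop]
      omega
    · intro j hL hR
      have hj : j < l2.length := by
        simp [List.length_zip, List.length_take, List.length_replicate] at hL
        omega
      rw [List.getElem_zip, List.getElem_map, List.getElem_range]
      rw [padded_getElem l1 fv (l2.length - l1.length) j (by omega)]
      rw [getD_eq_getElem' l2 j hj]
  · -- equal lengths
    rw [if_pos heq, if_pos (by omega)]
    rw [zip_eq_map_range l1 l2 heq]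
    have hmax : max l1.length l2.length = l1.length := by omega
    have hmin : min l1.length l2.length = l1.length := by omega
    rw [hmax, hmin, Nat.sub_self]
    apply List.map_congr_left
    intro j hj
    by_cases h : j < (l1.length + 1) / 2 <;> simp [h]
  · -- len1 > len2 : A pads list2
    rw [if_neg (by omega), if_neg (by omega), if_neg (by omega)]
    have hmax : max l1.length l2.length = l1.length := by omega
    have hmin : min l1.length l2.length = l2.length := by omega
    simp only [hmax, hmin]
    apply List.ext_getElem
    · simp [List.length_take, List.length_replicate, List.length_drop]
      omega
    · intro j hL hR
      have hj : j < l1.length := by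
        simp [List.length_zip, List.length_take, List.length_replicate] at hL
        omega
      rw [List.getElem_zip, List.getElem_map, List.getElem_range]
      rw [padded_getElem l2 fv (l1.length - l2.length) j (by omega)]
      rw [getD_eq_getElem' l1 j hj]
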